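-- pv_equiv track=rewrite | github.com/girishramnani/py-programs | convergence.py | fractionalcoll
-- ===== SOURCE A (Python) =====
-- def fractionalcoll(num,n):
--     li=[int(num)]
--     x=1
--     while len(li) <n:
--         if (len(li)+1)%3==0 :
--             li.append(2*int(x))
--             x+=1
--         else:
--             li.append(1)
--     numerator=1
--     denominator=li[-1]
--     for i in range(len(li)-2,-1,-1):
--         numerator+=denominator*li[i]
--         numerator,denominator = denominator,numerator
--         #y              #x
--     return denominator
-- ===== SOURCE B (Python) =====
-- def fractionalcoll(num, n):
--     # forward fundamental recurrence on the convergent numerators: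
--     # state (h_prev, h_curr) after processing the seed coefficient int(num)
--     h_prev, h_curr = 1, int(num)
--     k = 1  # coefficients processed so far
--     x = 1
--     while k < n:
--         if (k + 1) % 3 == 0:
--             a = 2 * x
--             x += 1
--         else:
--             a = 1
--         h_prev, h_curr = h_curr, a * h_curr + h_prev
--         k += 1
--     return h_curr
-- ===== Notes on version B (the rewrite author's own statement) =====
-- stated objective: alternative
-- what changed: Replaces A's build-the-coefficient-list-then-backward-reciprocal-sweep with a single forward pass that generates each coefficient on the fly and maintains the two convergent numerators via the fundamental recurrence h_prev, h_curr = h_curr, a*h_curr + h_prev (no list is built); equality rests on the continuant symmetry K(l) = K(reverse l).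
import Mathlib
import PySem

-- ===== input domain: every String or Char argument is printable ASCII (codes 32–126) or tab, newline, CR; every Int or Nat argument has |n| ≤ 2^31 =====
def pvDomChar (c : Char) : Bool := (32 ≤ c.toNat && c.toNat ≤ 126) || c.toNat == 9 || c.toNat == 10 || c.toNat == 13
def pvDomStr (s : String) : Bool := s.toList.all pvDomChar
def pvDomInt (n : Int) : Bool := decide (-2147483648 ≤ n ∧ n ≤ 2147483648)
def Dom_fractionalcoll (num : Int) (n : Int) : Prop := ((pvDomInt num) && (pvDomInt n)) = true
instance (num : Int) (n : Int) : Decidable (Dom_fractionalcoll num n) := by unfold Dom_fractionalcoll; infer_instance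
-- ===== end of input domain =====

-- B replaces A's build-list-then-backward-reciprocal-sweep by one forward pass keeping the
-- two convergent numerators (fundamental recurrence); same O(n) time, no list (objective: alternative).

-- ===== PORT A =====
-- the while loop: li grows by one element per iteration while len(li) < n
def pvBuildA (n : Int) (li : List Int) (x : Int) : List Int :=
  if h : (li.length : Int) < n then
    if PySem.Int.mod ((li.length : Int) + 1) 3 == 0 then
      pvBuildA n (li ++ [2 * x]) (x + 1)
    else
      pvBuildA n (li ++ [1]) x
  else li
termination_by (n - li.length).toNat
decreasing_by all_goals (simp only [List.length_append, List.length_cons, List.length_nil]; omega)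

def fractionalcoll (num : Int) (n : Int) : Int :=
  let li := pvBuildA n [num] 1
  -- for i in range(len(li)-2, -1, -1): numerator += denominator*li[i]; swap
  -- (pyGetD with default 0 is exact here: every index produced by the range is in bounds)
  let st := (PySem.List.pyRange ((li.length : Int) - 2) (-1) (-1)).foldl
    (fun (s : Int × Int) i => (s.2, s.1 + s.2 * PySem.List.pyGetD li i 0))
    (1, PySem.List.pyGetD li (-1) 0)
  st.2

-- ===== PORT B =====
-- the while loop of Source B: k coefficients processed, state (h_prev, h_curr), x the even-coefficient counter
def pvAltLoop (n : Int) (hp : Int) (hc : Int) (x : Int) (k : Int) : Int :=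
  if h : k < n then
    let ax := if PySem.Int.mod (k + 1) 3 == 0 then (2 * x, x + 1) else (1, x)
    pvAltLoop n hc (ax.1 * hc + hp) ax.2 (k + 1)
  else hc
termination_by (n - k).toNat
decreasing_by omega

def fractionalcoll_alt (num : Int) (n : Int) : Int :=
  pvAltLoop n 1 num 1 1

-- ===== PRECONDITION & SPEC =====
def Spec_fractionalcoll (num : Int) (n : Int) (out : Int) : Prop := out = fractionalcoll_alt num n
instance (num : Int) (n : Int) (out : Int) : Decidable (Spec_fractionalcoll num n out) := by unfold Spec_fractionalcoll; infer_instance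

-- ===== CLAIM (what is proved, stated in full; the proofs are below) =====
def Claim_equal_fractionalcoll : Prop := ∀ (num : Int) (n : Int), Dom_fractionalcoll num n → Spec_fractionalcoll num n (fractionalcoll num n)

-- ===== LEMMAS AND PROOFS =====

-- the continued-fraction step on the pair of successive convergent numerators
def pvStep (s : Int × Int) (a : Int) : Int × Int := (s.2, a * s.2 + s.1)

-- the coefficient stream both programs generate, starting at position k with counter x
def pvCoeffs (n : Int) (k : Int) (x : Int) : List Int :=
  if h : k < n then
    (if PySem.Int.mod (k + 1) 3 == 0 then 2 * x else 1) ::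
      pvCoeffs n (k + 1) (if PySem.Int.mod (k + 1) 3 == 0 then x + 1 else x)
  else []
termination_by (n - k).toNat
decreasing_by omega

theorem pvBuildA_eq (n : Int) (li : List Int) (x : Int) :
    pvBuildA n li x = li ++ pvCoeffs n (li.length : Int) x := by
  induction li, x using pvBuildA.induct n with
  | case1 li x h hc ih =>
    rw [pvBuildA, pvCoeffs]
    simp only [h, hc, dif_pos, if_pos, ih, List.length_append, List.length_cons,
      List.length_nil, List.append_assoc, List.cons_append, List.nil_append]
    norm_num
  | case2 li x h hc ih =>
    rw [pvBuildA, pvCoeffs]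
    simp only [h, hc, dif_pos, if_neg, Bool.false_eq_true, not_false_iff, ih,
      List.length_append, List.length_cons, List.length_nil, List.append_assoc,
      List.cons_append, List.nil_append]
    norm_num
  | case3 li x h =>
    rw [pvBuildA, pvCoeffs]
    simp [h]

theorem pvAltLoop_eq (n : Int) (hp hc x k : Int) :
    pvAltLoop n hp hc x k = ((pvCoeffs n k x).foldl pvStep (hp, hc)).2 := by
  induction hp, hc, x, k using pvAltLoop.induct n with
  | case1 hp hc x k h ax ih =>
    rw [pvAltLoop, pvCoeffs]
    simp only [ax] at ih
    by_cases hm : PySem.Int.mod (k + 1) 3 == 0 <;>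
      simp only [hm, dite_true, dite_false, Bool.false_eq_true] at ih <;>
      simp only [h, hm, dif_pos, if_true, if_false, Bool.false_eq_true,
        List.foldl_cons, pvStep] <;>
      rw [ih]
  | case2 hp hc x k h =>
    rw [pvAltLoop, pvCoeffs]
    simp [h]

theorem pvFoldl_linear (l : List Int) : ∀ (x y : Int),
    l.foldl pvStep (x, y) =
      (x * (l.foldl pvStep (1, 0)).1 + y * (l.foldl pvStep (0, 1)).1,
       x * (l.foldl pvStep (1, 0)).2 + y * (l.foldl pvStep (0, 1)).2) := by
  induction l with
  | nil => intro x y; simp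
  | cons a s ih =>
    intro x y
    simp only [List.foldl_cons]
    rw [show pvStep (x, y) a = (y, a * y + x) by simp [pvStep],
        show pvStep (1, 0) a = (0, 1) by norm_num [pvStep],
        show pvStep (0, 1) a = (1, a) by norm_num [pvStep],
        ih y (a * y + x), ih 1 a]
    refine Prod.ext ?_ ?_ <;> (simp; ring)

theorem pvFoldl_rev (l : List Int) :
    (l.reverse.foldl pvStep (0, 1)).2 = (l.foldl pvStep (0, 1)).2 ∧
    (l.reverse.foldl pvStep (0, 1)).1 = (l.foldl pvStep (1, 0)).2 := by
  induction l with
  | nil => simp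
  | cons a t ih =>
    simp only [List.reverse_cons, List.foldl_append, List.foldl_cons, List.foldl_nil]
    rw [show ∀ s : Int × Int, pvStep s a = (s.2, a * s.2 + s.1) from fun s => rfl]
    rw [ih.1, ih.2]
    rw [show pvStep (0, 1) a = (1, a) by norm_num [pvStep],
        show pvStep (1, 0) a = (0, 1) by norm_num [pvStep]]
    rw [pvFoldl_linear t 1 a, pvFoldl_linear t 0 1]
    constructor <;> simp <;> ring

theorem pvRangeFold (li : List Int) : ∀ (m : Nat) (s : Int × Int), m ≤ li.length →
    (PySem.List.pyRange ((m : Int) - 1) (-1) (-1)).foldl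
        (fun (s : Int × Int) i => (s.2, s.1 + s.2 * PySem.List.pyGetD li i 0)) s
      = (li.take m).reverse.foldl pvStep s := by
  intro m
  induction m with
  | zero =>
    intro s _
    rw [PySem.List.pyRange_neg_one_eq_nil (by omega)]
    simp
  | succ m ih =>
    intro s hm
    have h1 : ((m + 1 : Nat) : Int) - 1 = (m : Int) := by omega
    have hlt : m < li.length := by omega
    rw [h1, PySem.List.pyRange_neg_one_cons (by omega)]
    simp only [List.foldl_cons]
    rw [PySem.List.pyGetD_eq_getElem li 0 (by omega) (by exact_mod_cast hlt)]
    rw [ih _ (by omega)]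
    have htake : li.take (m + 1) = li.take m ++ [li[m]] := by
      rw [List.take_add_one]
      simp [List.getElem?_eq_getElem hlt]
    rw [htake]
    simp only [List.reverse_append, List.reverse_singleton, List.singleton_append,
      List.foldl_cons, pvStep, Int.toNat_natCast]
    ring_nf

-- A's backward index sweep over a nonempty list computes the forward continuant pair's numerator
theorem pvBack_eq (li : List Int) (hne : li ≠ []) :
    ((PySem.List.pyRange ((li.length : Int) - 2) (-1) (-1)).foldl
        (fun (s : Int × Int) i => (s.2, s.1 + s.2 * PySem.List.pyGetD li i 0))
        (1, PySem.List.pyGetD li (-1) 0)).2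
      = (li.foldl pvStep (0, 1)).2 := by
  have hlen : 1 ≤ li.length := List.length_pos_iff.mpr hne
  have hidx : ((li.length : Int) - 2) = ((li.length - 1 : Nat) : Int) - 1 := by omega
  rw [hidx, pvRangeFold li (li.length - 1) _ (by omega)]
  rw [PySem.List.pyGetD_neg_one li 0 hne]
  rw [← List.dropLast_eq_take]
  have hmain := (pvFoldl_rev li).1
  have hrev : li.reverse = li.getLast hne :: li.dropLast.reverse := by
    conv_lhs => rw [← List.dropLast_concat_getLast hne]
    simp
  rw [hrev] at hmain
  simp only [List.foldl_cons] at hmain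
  rw [show pvStep (0, 1) (li.getLast hne) = (1, li.getLast hne) by norm_num [pvStep]] at hmain
  exact hmain

theorem fractionalcoll_eq_alt (num n : Int) :
    fractionalcoll num n = fractionalcoll_alt num n := by
  have hbuild : pvBuildA n [num] 1 = num :: pvCoeffs n 1 1 := by
    rw [pvBuildA_eq]; norm_num
  simp only [fractionalcoll, fractionalcoll_alt, hbuild]
  rw [pvAltLoop_eq, pvBack_eq (num :: pvCoeffs n 1 1) (by simp)]
  simp only [List.foldl_cons]
  rw [show pvStep (0, 1) num = (1, num) by norm_num [pvStep]]

-- ===== VERDICT (by name: the statement is the Claim_ definition above) =====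
theorem fractionalcoll_spec : Claim_equal_fractionalcoll := by
  intro num n _
  unfold Spec_fractionalcoll
  exact fractionalcoll_eq_alt num n
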